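-- pv_equiv track=rewrite | github.com/fishyyuser/Advent_of_code_2025 | aoc/day04/part1_optimized_sliding_window.py | check_mid
-- ===== SOURCE A (Python) =====
-- def check_val(ch)->int:
--     return 1 if ch=="@" else 0
--
-- def check_left(r1:[int]=[],r2:[int]=[],r3:[int]=[]):
--
--     c1=check_val(r2[0])+check_val(r3[0])+check_val(r1[0])
--     c2=check_val(r2[1])+check_val(r3[1])+check_val(r1[1])
--
--     return 1 if c1+c2<5 else 0
--
-- def check_right(r1:[int]=[],r2:[int]=[],r3:[int]=[]):
--     idx=len(r2)-1
--
--     c2=check_val(r2[idx])+check_val(r3[idx])+check_val(r1[idx])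
--     c3=check_val(r2[idx-1])+check_val(r3[idx-1])+check_val(r1[idx-1])
--
--     return 1 if c2+c3<5 else 0
--
-- def check_mid(r1:[int],r2:[int],r3:[int])->int:
--     valid_rolls=0
--     c1=0
--     c2=0
--     c3=0
--     n=len(r1)
--
--     if r2[0]=="@":
--         valid_rolls += check_left(r1=r1,r2=r2,r3=r3)
--
--     c1=check_val(r1[0])+check_val(r2[0])+check_val(r3[0])
--     c2=check_val(r1[1])+check_val(r2[1])+check_val(r3[1])
--
--     for idx in range(1,n-1):
--         c3=check_val(r1[idx+1])+check_val(r2[idx+1])+check_val(r3[idx+1])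
--         if r2[idx]=="@" and c1+c2+c3<5:
--             valid_rolls +=1
--         c1,c2=c2,c3
--
--     if r2[n-1]=="@":
--         valid_rolls += check_right(r1=r1,r2=r2,r3=r3)
--
--     return valid_rolls
-- ===== SOURCE B (Python) =====
-- def check_mid(r1, r2, r3):
--     n = len(r1)
--     col = [(1 if r1[j] == "@" else 0) + (1 if r2[j] == "@" else 0) + (1 if r3[j] == "@" else 0)
--            for j in range(n)]
--     count = 0
--     for j in range(n):
--         if r2[j] == "@":
--             s = col[j] + (col[j - 1] if j > 0 else 0) + (col[j + 1] if j < n - 1 else 0)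
--             if s < 5:
--                 count += 1
--     return count
-- ===== Notes on version B (the rewrite author's own statement) =====
-- stated objective: simpler
-- what changed: B precomputes one per-column sum table and counts with a single uniform windowed pass over all positions, replacing A's rolling c1/c2/c3 registers and the two separate endpoint helpers check_left/check_right.
import Mathlib
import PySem

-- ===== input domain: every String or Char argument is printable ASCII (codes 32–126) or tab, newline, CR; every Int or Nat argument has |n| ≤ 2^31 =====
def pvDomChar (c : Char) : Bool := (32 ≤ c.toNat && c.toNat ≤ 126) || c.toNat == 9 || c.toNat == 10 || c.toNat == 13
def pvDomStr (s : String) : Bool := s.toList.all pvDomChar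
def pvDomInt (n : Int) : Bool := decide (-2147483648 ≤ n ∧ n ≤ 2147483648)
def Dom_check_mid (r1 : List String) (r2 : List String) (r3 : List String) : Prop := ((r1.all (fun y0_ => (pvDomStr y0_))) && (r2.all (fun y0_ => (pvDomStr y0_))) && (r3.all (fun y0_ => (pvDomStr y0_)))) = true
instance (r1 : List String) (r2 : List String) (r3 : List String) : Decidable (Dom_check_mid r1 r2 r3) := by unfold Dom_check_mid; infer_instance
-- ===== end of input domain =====

-- B replaces A's rolling c1/c2/c3 window and the separate check_left/check_right endpoint
-- helpers with a per-column sum table and one uniform windowed pass (objective: simpler).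

-- ===== PORT A =====
-- literal transliteration of Source A (list indexing via PySem.List.pyGetD; Pre_ excludes IndexError)
def check_val (ch : String) : Int := if ch = "@" then 1 else 0

def check_left (r1 : List String) (r2 : List String) (r3 : List String) : Int :=
  let c1 := check_val (PySem.List.pyGetD r2 0 "") + check_val (PySem.List.pyGetD r3 0 "") + check_val (PySem.List.pyGetD r1 0 "")
  let c2 := check_val (PySem.List.pyGetD r2 1 "") + check_val (PySem.List.pyGetD r3 1 "") + check_val (PySem.List.pyGetD r1 1 "")
  if c1 + c2 < 5 then 1 else 0

def check_right (r1 : List String) (r2 : List String) (r3 : List String) : Int :=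
  let idx : Int := (r2.length : Int) - 1
  let c2 := check_val (PySem.List.pyGetD r2 idx "") + check_val (PySem.List.pyGetD r3 idx "") + check_val (PySem.List.pyGetD r1 idx "")
  let c3 := check_val (PySem.List.pyGetD r2 (idx-1) "") + check_val (PySem.List.pyGetD r3 (idx-1) "") + check_val (PySem.List.pyGetD r1 (idx-1) "")
  if c2 + c3 < 5 then 1 else 0

-- the body of A's for-loop, acting on the state (valid_rolls, c1, c2)
def pvLoopA (r1 : List String) (r2 : List String) (r3 : List String)
    (s : Int × Int × Int) (idx : Int) : Int × Int × Int :=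
  let c3 := check_val (PySem.List.pyGetD r1 (idx+1) "") + check_val (PySem.List.pyGetD r2 (idx+1) "") + check_val (PySem.List.pyGetD r3 (idx+1) "")
  let valid_rolls := if PySem.List.pyGetD r2 idx "" = "@" ∧ s.2.1 + s.2.2 + c3 < 5 then s.1 + 1 else s.1
  (valid_rolls, s.2.2, c3)

def check_mid (r1 : List String) (r2 : List String) (r3 : List String) : Int :=
  let n : Int := (r1.length : Int)
  let valid_rolls : Int := if PySem.List.pyGetD r2 0 "" = "@" then check_left r1 r2 r3 else 0
  let c1 := check_val (PySem.List.pyGetD r1 0 "") + check_val (PySem.List.pyGetD r2 0 "") + check_val (PySem.List.pyGetD r3 0 "")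
  let c2 := check_val (PySem.List.pyGetD r1 1 "") + check_val (PySem.List.pyGetD r2 1 "") + check_val (PySem.List.pyGetD r3 1 "")
  let st := (PySem.List.pyRange 1 (n-1) 1).foldl (pvLoopA r1 r2 r3) (valid_rolls, c1, c2)
  if PySem.List.pyGetD r2 (n-1) "" = "@" then st.1 + check_right r1 r2 r3 else st.1

-- ===== PORT B =====
-- literal transliteration of Source B (indexing is by non-negative j < lengths, so List.getD is exact there)
def check_mid_alt (r1 : List String) (r2 : List String) (r3 : List String) : Int :=
  let n := r1.length
  let col : List Int := (List.range n).map (fun j =>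
    (if r1.getD j "" = "@" then (1:Int) else 0) + (if r2.getD j "" = "@" then 1 else 0) + (if r3.getD j "" = "@" then 1 else 0))
  (List.range n).foldl (fun count j =>
    if r2.getD j "" = "@" then
      let s := col.getD j 0 + (if 0 < j then col.getD (j-1) 0 else 0) + (if j < n-1 then col.getD (j+1) 0 else 0)
      if s < 5 then count + 1 else count
    else count) 0

-- ===== PRECONDITION & SPEC =====
-- Pre_ is exactly the set of inputs on which Python A returns normally: A always indexes
-- columns 0 and 1 of all three rows (IndexError when len(r1) < 2 or a row is shorter than r1),
-- and when the last column of r2 holds "@", check_right indexes column len(r2)-1 of every row.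
def Pre_check_mid (r1 : List String) (r2 : List String) (r3 : List String) : Prop :=
  2 ≤ r1.length ∧ r1.length ≤ r2.length ∧ r1.length ≤ r3.length ∧
  (r2.getD (r1.length - 1) "" = "@" → r2.length ≤ r1.length ∧ r2.length ≤ r3.length)
instance (r1 : List String) (r2 : List String) (r3 : List String) : Decidable (Pre_check_mid r1 r2 r3) := by unfold Pre_check_mid; infer_instance

def pvWitness_check_mid : List String × List String × List String :=
  (["@", "."], [".", "@"], ["@", "@"])

def Spec_check_mid (r1 : List String) (r2 : List String) (r3 : List String) (out : Int) : Prop := out = check_mid_alt r1 r2 r3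
instance (r1 : List String) (r2 : List String) (r3 : List String) (out : Int) : Decidable (Spec_check_mid r1 r2 r3 out) := by unfold Spec_check_mid; infer_instance

-- ===== CLAIM (what is proved, stated in full; the proofs are below) =====
def Claim_equal_check_mid : Prop := ∀ (r1 : List String) (r2 : List String) (r3 : List String), Dom_check_mid r1 r2 r3 → Pre_check_mid r1 r2 r3 → Spec_check_mid r1 r2 r3 (check_mid r1 r2 r3)

-- ===== LEMMAS AND PROOFS =====

-- column sum at a Nat index (B's view) and at an Int index (A's view)
def pvColN (r1 r2 r3 : List String) (j : Nat) : Int :=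
  check_val (r1.getD j "") + check_val (r2.getD j "") + check_val (r3.getD j "")

def pvColI (r1 r2 r3 : List String) (i : Int) : Int :=
  check_val (PySem.List.pyGetD r1 i "") + check_val (PySem.List.pyGetD r2 i "") + check_val (PySem.List.pyGetD r3 i "")

-- B's per-position contribution
def pvTB (r1 r2 r3 : List String) (n : Nat) (j : Nat) : Int :=
  if r2.getD j "" = "@" ∧
      pvColN r1 r2 r3 j + (if 0 < j then pvColN r1 r2 r3 (j-1) else 0) +
        (if j < n-1 then pvColN r1 r2 r3 (j+1) else 0) < 5
  then 1 else 0

-- A's per-iteration contribution in the middle loop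
def pvTA (r1 r2 r3 : List String) (i : Int) : Int :=
  if PySem.List.pyGetD r2 i "" = "@" ∧
      pvColI r1 r2 r3 (i-1) + pvColI r1 r2 r3 i + pvColI r1 r2 r3 (i+1) < 5
  then 1 else 0

theorem pvColI_natCast (r1 r2 r3 : List String) (j : Nat) :
    pvColI r1 r2 r3 (j : Int) = pvColN r1 r2 r3 j := by
  simp [pvColI, pvColN]

theorem pv_foldl_sum (f : Int → Nat → Int) (t : Nat → Int)
    (hf : ∀ c j, f c j = c + t j) :
    ∀ (l : List Nat) (x : Int), l.foldl f x = x + (l.map t).sum := by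
  intro l
  induction l with
  | nil => intro x; simp
  | cons a l ih => intro x; simp [List.foldl_cons, hf, ih, add_assoc]

theorem pv_getD_map_range {α : Type} (f : Nat → α) (n i : Nat) (d : α) (h : i < n) :
    ((List.range n).map f).getD i d = f i := by
  simp [List.getD, h]

-- B's loop body adds an (at most) 0/1 contribution per position
theorem pv_foldl_body (r2 : List String) (col : List Int) (n : Nat) (l : List Nat) (x : Int) :
    l.foldl (fun count j =>
        if r2.getD j "" = "@" then
          let s := col.getD j 0 + (if 0 < j then col.getD (j-1) 0 else 0) + (if j < n-1 then col.getD (j+1) 0 else 0)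
          if s < 5 then count + 1 else count
        else count) x
      = x + (l.map (fun j => if r2.getD j "" = "@" ∧ col.getD j 0 + (if 0 < j then col.getD (j-1) 0 else 0) + (if j < n-1 then col.getD (j+1) 0 else 0) < 5 then (1:Int) else 0)).sum := by
  apply pv_foldl_sum
  intro c j
  by_cases h : r2.getD j "" = "@" <;>
    by_cases h2 : col.getD j 0 + (if 0 < j then col.getD (j-1) 0 else 0) + (if j < n-1 then col.getD (j+1) 0 else 0) < 5 <;>
      simp only [List.getD] at h h2 ⊢ <;> simp [h, h2]

-- B computes the sum of pvTB over all positions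
theorem pv_alt_sum (r1 r2 r3 : List String) :
    check_mid_alt r1 r2 r3 = ((List.range r1.length).map (pvTB r1 r2 r3 r1.length)).sum := by
  simp only [check_mid_alt]
  rw [pv_foldl_body]
  rw [zero_add]
  apply congrArg
  apply List.map_congr_left
  intro j hj
  have hjn : j < r1.length := List.mem_range.mp hj
  by_cases h : r2.getD j "" = "@"
  · rw [pv_getD_map_range _ _ _ _ hjn]
    by_cases hl : 0 < j <;> by_cases hr : j < r1.length - 1 <;>
      simp only [hl, hr, if_pos, if_neg, not_false_iff] <;>
      · first
        | (rw [pv_getD_map_range _ _ _ _ (by omega : j - 1 < r1.length),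
              pv_getD_map_range _ _ _ _ (by omega : j + 1 < r1.length)]
           simp [pvTB, pvColN, check_val, hl, hr])
        | (rw [pv_getD_map_range _ _ _ _ (by omega : j - 1 < r1.length)]
           simp [pvTB, pvColN, check_val, hl, hr])
        | (rw [pv_getD_map_range _ _ _ _ (by omega : j + 1 < r1.length)]
           simp [pvTB, pvColN, check_val, hl, hr])
        | simp [pvTB, pvColN, check_val, hl, hr]
  · simp only [List.getD] at h
    simp [pvTB, List.getD, h]

-- the loop invariant for A's rolling window
theorem pv_loopA_inv (r1 r2 r3 : List String) (k : Nat) (v : Int) :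
    (PySem.List.pyRange 1 (1 + (k:Int)) 1).foldl (pvLoopA r1 r2 r3) (v, pvColI r1 r2 r3 0, pvColI r1 r2 r3 1)
      = (v + ((List.range k).map (fun (j : Nat) => pvTA r1 r2 r3 (1 + (j:Int)))).sum,
          pvColI r1 r2 r3 (k:Int), pvColI r1 r2 r3 ((k:Int)+1)) := by
  induction k generalizing v with
  | zero =>
    rw [show ((1:Int) + (0:Nat)) = 1 by norm_num, PySem.List.pyRange_one_eq_nil le_rfl]
    simp
  | succ k ih =>
    rw [show ((1:Int) + ((k+1 : Nat):Int)) = (1 + (k:Int)) + 1 by push_cast; ring,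
        PySem.List.pyRange_one_succ_right (by omega : (1:Int) ≤ 1 + (k:Int)),
        List.foldl_append, ih]
    simp only [List.foldl_cons, List.foldl_nil]
    rw [List.range_succ, List.map_append, List.sum_append]
    simp only [pvLoopA, List.map_cons, List.map_nil, List.sum_cons, List.sum_nil]
    have e1 : (1:Int) + (k:Int) + 1 = ((k:Int) + 1) + 1 := by ring
    have e2 : (1:Int) + (k:Int) - 1 = (k:Int) := by ring
    have e3 : ((k+1 : Nat):Int) = (k:Int) + 1 := by push_cast; ring
    refine Prod.ext ?_ (Prod.ext ?_ ?_)
    · show (if PySem.List.pyGetD r2 (1 + (k:Int)) "" = "@" ∧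
          pvColI r1 r2 r3 (k:Int) + pvColI r1 r2 r3 ((k:Int)+1) + pvColI r1 r2 r3 ((1:Int) + (k:Int) + 1) < 5
        then _ + 1 else _) = _
      rw [e1]
      unfold pvTA
      rw [e2, show ((1:Int) + (k:Int)) = (k:Int) + 1 by ring]
      by_cases h : PySem.List.pyGetD r2 ((k:Int) + 1) "" = "@" <;>
        by_cases h2 : pvColI r1 r2 r3 (k:Int) + pvColI r1 r2 r3 ((k:Int)+1) + pvColI r1 r2 r3 (((k:Int)+1)+1) < 5 <;>
          simp [h, h2] <;> ring
    · show pvColI r1 r2 r3 ((k:Int) + 1) = _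
      rw [e3]
    · show pvColI r1 r2 r3 ((1:Int) + (k:Int) + 1) = _
      rw [e1, e3]

-- splitting B's sum into first position, middle positions and last position
theorem pv_sum_split (t : Nat → Int) (m : Nat) :
    ((List.range (m+2)).map t).sum
      = t 0 + ((List.range m).map (fun j => t (j+1))).sum + t (m+1) := by
  rw [show m + 2 = (m+1) + 1 from rfl, List.range_succ, List.map_append, List.sum_append,
      List.range_succ_eq_map]
  simp only [List.map_map, List.sum_cons, List.map_cons, List.map_nil, List.sum_nil, add_zero]
  have hmc : List.map (t ∘ Nat.succ) (List.range m) = List.map (fun j => t (j+1)) (List.range m) :=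
    List.map_congr_left (fun j _ => rfl)
  rw [hmc]

-- middle positions agree
theorem pv_mid_eq (r1 r2 r3 : List String) (n j : Nat) (h1 : 1 ≤ j) (h2 : j + 1 ≤ n - 1) (_hn : 2 ≤ n) :
    pvTA r1 r2 r3 (j : Int) = pvTB r1 r2 r3 n j := by
  have hl : 0 < j := h1
  have hr : j < n - 1 := by omega
  unfold pvTA pvTB
  rw [show ((j:Int) - 1) = ((j-1 : Nat):Int) by omega,
      show ((j:Int) + 1) = ((j+1 : Nat):Int) by push_cast; ring]
  simp only [pvColI_natCast, PySem.List.pyGetD_natCast, hl, hr, if_true]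
  by_cases h : r2.getD j "" = "@" <;> simp [h] <;> ring_nf

-- the first position: A's check_left branch equals B's contribution at 0
theorem pv_left_eq (r1 r2 r3 : List String) (n : Nat) (hn : 2 ≤ n) :
    (if PySem.List.pyGetD r2 0 "" = "@" then check_left r1 r2 r3 else 0)
      = pvTB r1 r2 r3 n 0 := by
  have g1 : ∀ xs : List String, PySem.List.pyGetD xs 1 "" = xs.getD 1 "" := by
    intro xs
    rw [show (1:Int) = ((1:Nat):Int) from by norm_num, PySem.List.pyGetD_natCast]
  have hr : 0 < n - 1 := by omega
  unfold check_left pvTB pvColN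
  simp only [PySem.List.pyGetD_zero, g1, hr, if_true, Nat.lt_irrefl, if_false]
  by_cases h : r2.getD 0 "" = "@" <;> simp only [List.getD] at h <;> simp [h] <;> ring_nf

-- the last position: A's check_right branch equals B's contribution at n-1
theorem pv_right_eq (r1 r2 r3 : List String) (m : Nat) (hm : r1.length = m + 2)
    (hb : r1.length ≤ r2.length) (_hc : r1.length ≤ r3.length)
    (hend : r2.getD (r1.length - 1) "" = "@" → r2.length ≤ r1.length ∧ r2.length ≤ r3.length) :
    (if PySem.List.pyGetD r2 (1 + (m:Int)) "" = "@" then check_right r1 r2 r3 else 0)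
      = pvTB r1 r2 r3 (m+2) (m+1) := by
  have g : PySem.List.pyGetD r2 (1 + (m:Int)) "" = r2.getD (m+1) "" := by
    rw [show (1 + (m:Int)) = ((m+1 : Nat):Int) by push_cast; ring, PySem.List.pyGetD_natCast]
  rw [g]
  by_cases h : r2.getD (m+1) "" = "@"
  · obtain ⟨hb2, hc2⟩ := hend (by rw [hm]; simpa using h)
    have hlen : r2.length = m + 2 := by omega
    rw [if_pos h]
    simp only [check_right]
    rw [hlen,
        show (((m+2 : Nat)):Int) - 1 = ((m+1 : Nat):Int) by push_cast; ring,
        show (((m+1 : Nat)):Int) - 1 = ((m : Nat):Int) by push_cast; ring]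
    simp only [PySem.List.pyGetD_natCast]
    unfold pvTB pvColN
    have hg1 : 0 < m + 1 := by omega
    have hg2 : ¬ (m + 1 < m + 2 - 1) := by omega
    simp only [h, hg1, hg2, if_true, if_false, true_and]
    simp only [Nat.add_sub_cancel]
    ring_nf
  · unfold pvTB
    simp only [List.getD] at h
    simp [h]

-- ===== VERDICT (by name: the statement is the Claim_ definition above) =====
theorem check_mid_spec : Claim_equal_check_mid := by
  intro r1 r2 r3 _ hpre
  obtain ⟨h2, hb, hc, hend⟩ := hpre
  unfold Spec_check_mid
  rw [pv_alt_sum]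
  obtain ⟨m, hm⟩ : ∃ m, r1.length = m + 2 := ⟨r1.length - 2, by omega⟩
  simp only [check_mid]
  rw [hm]
  rw [show (((m+2 : Nat)):Int) - 1 = 1 + (m:Int) by push_cast; ring]
  rw [show (check_val (PySem.List.pyGetD r1 0 "") + check_val (PySem.List.pyGetD r2 0 "") + check_val (PySem.List.pyGetD r3 0 ""))
        = pvColI r1 r2 r3 0 from rfl,
      show (check_val (PySem.List.pyGetD r1 1 "") + check_val (PySem.List.pyGetD r2 1 "") + check_val (PySem.List.pyGetD r3 1 ""))
        = pvColI r1 r2 r3 1 from rfl]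
  rw [pv_loopA_inv]
  dsimp only
  rw [pv_sum_split (pvTB r1 r2 r3 (m+2)) m]
  have hmid : (List.range m).map (fun (j : Nat) => pvTA r1 r2 r3 (1 + (j:Int)))
      = (List.range m).map (fun j => pvTB r1 r2 r3 (m+2) (j+1)) := by
    apply List.map_congr_left
    intro j hj
    have hj' : j < m := List.mem_range.mp hj
    rw [show (1 + (j:Int)) = ((j+1 : Nat):Int) by push_cast; ring]
    exact pv_mid_eq r1 r2 r3 (m+2) (j+1) (by omega) (by omega) (by omega)
  rw [hmid]
  rw [pv_left_eq r1 r2 r3 (m+2) (by omega)]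
  have hR := pv_right_eq r1 r2 r3 m hm hb hc hend
  by_cases hc2 : PySem.List.pyGetD r2 (1 + (m:Int)) "" = "@"
  · rw [if_pos hc2]
    rw [if_pos hc2] at hR
    rw [hR]
  · rw [if_neg hc2]
    rw [if_neg hc2] at hR
    rw [← hR]
    ring
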